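-- pv_equiv track=rewrite | github.com/irfanzq/netbox-automation-plugin | netbox_automation_plugin/sync/reporting/drift_report/proposed_nic_derived.py | _label_for_mbps_int
-- ===== SOURCE A (Python) =====
-- _SPEED_MBPS_TO_LABEL: tuple[tuple[int, str], ...] = (
--     (4_000_000, "4 Tbps"),
--     (400_000, "400 Gbps"),
--     (200_000, "200 Gbps"),
--     (100_000, "100 Gbps"),
--     (56_000, "56 Gbps"),
--     (50_000, "50 Gbps"),
--     (40_000, "40 Gbps"),
--     (25_000, "25 Gbps"),
--     (10_000, "10 Gbps"),
--     (2_500, "2.5 Gbps"),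
--     (1_000, "1 Gbps"),
--     (100, "100 Mbps"),
-- )
--
-- def _label_for_mbps_int(n: int) -> str:
--     if n <= 0:
--         return "0 Mbps"
--     for threshold, label in _SPEED_MBPS_TO_LABEL:
--         if n == threshold:
--             return label
--     if n >= 1_000_000 and n % 1_000_000 == 0:
--         return f"{n // 1_000_000} Tbps"
--     if n >= 1_000 and n % 1_000 == 0:
--         return f"{n // 1_000} Gbps"
--     return f"{n} Mbps"
-- ===== SOURCE B (Python) =====
-- def _label_for_mbps_int(n: int) -> str:
--     if n <= 0:
--         return "0 Mbps"
--     if n == 2500: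
--         return "2.5 Gbps"
--     if n >= 1_000_000 and n % 1_000_000 == 0:
--         return f"{n // 1_000_000} Tbps"
--     if n >= 1_000 and n % 1_000 == 0:
--         return f"{n // 1_000} Gbps"
--     return f"{n} Mbps"
-- ===== Notes on version B (the rewrite author's own statement) =====
-- stated objective: simpler
-- what changed: Replaced the 12-entry table scan with direct closed-form arithmetic (Tbps/Gbps divisibility), keeping only the one genuinely irregular value 2500 -> '2.5 Gbps' as a branch; every other table row coincides with the arithmetic fallback.
import Mathlib
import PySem

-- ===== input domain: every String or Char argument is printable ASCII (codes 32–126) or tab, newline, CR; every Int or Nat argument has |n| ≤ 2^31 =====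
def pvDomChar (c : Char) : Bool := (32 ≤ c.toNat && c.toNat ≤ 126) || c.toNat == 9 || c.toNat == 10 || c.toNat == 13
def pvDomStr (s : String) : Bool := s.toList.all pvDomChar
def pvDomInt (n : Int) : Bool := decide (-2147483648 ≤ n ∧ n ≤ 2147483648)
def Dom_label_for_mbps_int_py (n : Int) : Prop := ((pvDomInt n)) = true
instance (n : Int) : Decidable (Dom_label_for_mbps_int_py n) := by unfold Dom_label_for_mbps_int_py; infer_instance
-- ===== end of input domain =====

-- B replaces A's 12-entry table scan by direct closed-form arithmetic plus the one irregular case 2500 ("simpler"; same behaviour on all ints).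
-- ===== PORT A =====
def pvSpeedTable : List (Int × String) :=
  [(4000000, "4 Tbps"), (400000, "400 Gbps"), (200000, "200 Gbps"), (100000, "100 Gbps"),
   (56000, "56 Gbps"), (50000, "50 Gbps"), (40000, "40 Gbps"), (25000, "25 Gbps"),
   (10000, "10 Gbps"), (2500, "2.5 Gbps"), (1000, "1 Gbps"), (100, "100 Mbps")]

-- the 'for threshold, label in _SPEED_MBPS_TO_LABEL: if n == threshold: return label' loop
def pvScanTable (n : Int) : List (Int × String) → Option String
  | [] => none
  | (threshold, label) :: rest => if n = threshold then some label else pvScanTable n rest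

def label_for_mbps_int_py (n : Int) : String :=
  if n ≤ 0 then "0 Mbps"
  else match pvScanTable n pvSpeedTable with
    | some label => label
    | none =>
      if n ≥ 1000000 ∧ n % 1000000 = 0 then PySem.Int.toStr (PySem.Int.floordiv n 1000000) ++ " Tbps"
      else if n ≥ 1000 ∧ n % 1000 = 0 then PySem.Int.toStr (PySem.Int.floordiv n 1000) ++ " Gbps"
      else PySem.Int.toStr n ++ " Mbps"

-- ===== PORT B =====
def label_for_mbps_int_py_alt (n : Int) : String :=
  if n ≤ 0 then "0 Mbps"
  else if n = 2500 then "2.5 Gbps"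
  else if n ≥ 1000000 ∧ n % 1000000 = 0 then PySem.Int.toStr (PySem.Int.floordiv n 1000000) ++ " Tbps"
  else if n ≥ 1000 ∧ n % 1000 = 0 then PySem.Int.toStr (PySem.Int.floordiv n 1000) ++ " Gbps"
  else PySem.Int.toStr n ++ " Mbps"

-- ===== PRECONDITION & SPEC =====
def Spec_label_for_mbps_int_py (n : Int) (out : String) : Prop := out = label_for_mbps_int_py_alt n
instance (n : Int) (out : String) : Decidable (Spec_label_for_mbps_int_py n out) := by unfold Spec_label_for_mbps_int_py; infer_instance

-- ===== CLAIM (what is proved, stated in full; the proofs are below) =====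
def Claim_equal_label_for_mbps_int_py : Prop := ∀ (n : Int), Dom_label_for_mbps_int_py n → Spec_label_for_mbps_int_py n (label_for_mbps_int_py n)

-- ===== LEMMAS AND PROOFS =====

-- ===== VERDICT (by name: the statement is the Claim_ definition above) =====
theorem label_for_mbps_int_py_spec : Claim_equal_label_for_mbps_int_py := by
  intro n _
  unfold Spec_label_for_mbps_int_py
  by_cases h0 : n ≤ 0
  · unfold label_for_mbps_int_py label_for_mbps_int_py_alt
    rw [if_pos h0, if_pos h0]
  by_cases h1 : n = 4000000
  · subst h1; decide
  by_cases h2 : n = 400000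
  · subst h2; decide
  by_cases h3 : n = 200000
  · subst h3; decide
  by_cases h4 : n = 100000
  · subst h4; decide
  by_cases h5 : n = 56000
  · subst h5; decide
  by_cases h6 : n = 50000
  · subst h6; decide
  by_cases h7 : n = 40000
  · subst h7; decide
  by_cases h8 : n = 25000
  · subst h8; decide
  by_cases h9 : n = 10000
  · subst h9; decide
  by_cases h10 : n = 2500
  · subst h10; decide
  by_cases h11 : n = 1000
  · subst h11; decide
  by_cases h12 : n = 100
  · subst h12; decide
  simp only [label_for_mbps_int_py, label_for_mbps_int_py_alt, pvSpeedTable, pvScanTable,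
    if_neg h0, if_neg h1, if_neg h2, if_neg h3, if_neg h4, if_neg h5, if_neg h6, if_neg h7, if_neg h8, if_neg h9, if_neg h10, if_neg h11, if_neg h12]
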